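-- pv_equiv track=rewrite | github.com/TURLEing/Rubrics-To-Tokens | roll/pipeline/rlvr/rewards/type2_checkers.py | check_sub_bullets
-- ===== SOURCE A (Python) =====
-- from typing import Any, Dict, Optional
--
-- def check_sub_bullets(text: str, kwargs: Dict[str, Any]) -> bool:
--     """Check: bullet points with * and sub-bullets with - for each."""
--     lines = text.split('\n')
--     bullet_lines = []
--     current_bullet = None
--     has_sub = False
--
--     for line in lines:
--         stripped = line.strip()
--         if stripped.startswith('* ') or stripped.startswith('*\t'):
--             if current_bullet is not None and not has_sub:
--                 return False
--             current_bullet = stripped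
--             has_sub = False
--         elif stripped.startswith('- ') or stripped.startswith('-\t'):
--             if current_bullet is not None:
--                 has_sub = True
--             bullet_lines.append(stripped)
--
--     # Check last bullet
--     if current_bullet is not None and not has_sub:
--         return False
--     # Must have at least one bullet
--     return current_bullet is not None
-- ===== SOURCE B (Python) =====
-- def check_sub_bullets(text: str, kwargs) -> bool:
--     """Check: bullet points with * and sub-bullets with - for each."""
--     # Classify each line into a token: True = bullet, False = sub-bullet; other lines drop out.
--     toks = []
--     for line in text.split('\n'):
--         s = line.strip()
--         if s.startswith('* ') or s.startswith('*\t'):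
--             toks.append(True)
--         elif s.startswith('- ') or s.startswith('-\t'):
--             toks.append(False)
--     # Valid iff there is a bullet, no bullet is immediately followed by a bullet,
--     # and the last token is not a bullet (so every bullet's segment has a sub).
--     if True not in toks:
--         return False
--     if toks[-1]:
--         return False
--     return all(not (a and b) for a, b in zip(toks, toks[1:]))
-- ===== Notes on version B (the rewrite author's own statement) =====
-- stated objective: simpler
-- what changed: B first classifies each line into a bullet/sub token list, then validates with three local checks (some bullet exists, no bullet immediately followed by a bullet, last token is not a bullet) instead of A's single stateful scan with early returns.
import Mathlib
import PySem

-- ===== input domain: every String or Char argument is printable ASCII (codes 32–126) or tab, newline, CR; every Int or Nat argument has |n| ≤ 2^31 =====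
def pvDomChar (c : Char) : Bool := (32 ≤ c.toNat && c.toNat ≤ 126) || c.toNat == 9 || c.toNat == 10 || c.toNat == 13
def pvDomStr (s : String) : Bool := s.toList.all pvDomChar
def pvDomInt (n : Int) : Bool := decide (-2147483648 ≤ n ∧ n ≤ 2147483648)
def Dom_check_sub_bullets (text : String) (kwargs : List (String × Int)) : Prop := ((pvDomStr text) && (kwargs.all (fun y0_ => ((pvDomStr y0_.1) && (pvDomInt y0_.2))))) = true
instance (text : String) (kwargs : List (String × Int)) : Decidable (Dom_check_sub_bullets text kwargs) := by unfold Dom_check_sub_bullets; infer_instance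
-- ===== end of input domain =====

-- B classifies lines into bullet/sub tokens once, then checks three local conditions
-- (a bullet exists, no adjacent bullets, last token not a bullet) instead of A's
-- running-state scan with early returns; objective: simpler (no speed claim).

-- ===== PORT A =====
-- A's loop state: none = early 'return False'; some (currentBulletExists, hasSub).
-- (current_bullet's string value is never compared, only whether it is None; the
--  bullet_lines list A builds is never read, so it is not carried.)
def pvStepA (st : Option (Bool × Bool)) (line : String) : Option (Bool × Bool) :=
  match st with
  | none => none
  | some (cur, hasSub) =>
    let stripped := PySem.Str.strip line
    if PySem.Str.startswith stripped "* " || PySem.Str.startswith stripped "*\t" then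
      if cur && !hasSub then none else some (true, false)
    else if PySem.Str.startswith stripped "- " || PySem.Str.startswith stripped "-\t" then
      if cur then some (cur, true) else some (cur, hasSub)
    else some (cur, hasSub)

def check_sub_bullets (text : String) (kwargs : List (String × Int)) : Bool :=
  -- split? with the non-empty separator "\n" always returns some
  match ((PySem.Str.split? text "\n").getD []).foldl pvStepA (some (false, false)) with
  | none => false
  | some (cur, hasSub) => if cur && !hasSub then false else cur

-- ===== PORT B =====
-- token of a line: some true = bullet ('* '/'*\t'), some false = sub ('- '/'-\t'), none = other
def pvTok (line : String) : Option Bool :=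
  let s := PySem.Str.strip line
  if PySem.Str.startswith s "* " || PySem.Str.startswith s "*\t" then some true
  else if PySem.Str.startswith s "- " || PySem.Str.startswith s "-\t" then some false
  else none

def check_sub_bullets_alt (text : String) (kwargs : List (String × Int)) : Bool :=
  let toks := ((PySem.Str.split? text "\n").getD []).foldl
    (fun acc line => match pvTok line with
      | some b => acc ++ [b]
      | none => acc) []
  if !toks.contains true then false
  else if (PySem.List.pyGet? toks (-1)).getD false then false  -- toks[-1]; toks ≠ [] here
  else (toks.zip toks.tail).all (fun p => !(p.1 && p.2))

-- ===== PRECONDITION & SPEC =====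
def Spec_check_sub_bullets (text : String) (kwargs : List (String × Int)) (out : Bool) : Prop := out = check_sub_bullets_alt text kwargs
instance (text : String) (kwargs : List (String × Int)) (out : Bool) : Decidable (Spec_check_sub_bullets text kwargs out) := by unfold Spec_check_sub_bullets; infer_instance

-- ===== CLAIM (what is proved, stated in full; the proofs are below) =====
def Claim_equal_check_sub_bullets : Prop := ∀ (text : String) (kwargs : List (String × Int)), Dom_check_sub_bullets text kwargs → Spec_check_sub_bullets text kwargs (check_sub_bullets text kwargs)

-- ===== LEMMAS AND PROOFS =====

-- token-level version of A's step
def pvStepTok (st : Option (Bool × Bool)) (t : Bool) : Option (Bool × Bool) :=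
  match st with
  | none => none
  | some (cur, hasSub) =>
    if t then (if cur && !hasSub then none else some (true, false))
    else (if cur then some (cur, true) else some (cur, hasSub))

lemma pvStepA_eq_tok (st : Option (Bool × Bool)) (line : String) :
    pvStepA st line = match pvTok line with
      | none => st
      | some t => pvStepTok st t := by
  cases st with
  | none => cases h : pvTok line <;> simp [pvStepA, pvStepTok]
  | some p =>
    obtain ⟨cur, hs⟩ := p
    simp only [pvStepA, pvTok, pvStepTok]
    split
    · simp
    · split <;> simp

lemma foldl_filterMap_tok (lines : List String) (st : Option (Bool × Bool)) :
    lines.foldl pvStepA st = (lines.filterMap pvTok).foldl pvStepTok st := by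
  induction lines generalizing st with
  | nil => rfl
  | cons l t ih =>
    simp only [List.foldl_cons, pvStepA_eq_tok, List.filterMap_cons]
    cases pvTok l <;> simp [List.foldl_cons, ih]

lemma toks_eq_filterMap (lines : List String) (acc : List Bool) :
    lines.foldl (fun acc line => match pvTok line with
      | some b => acc ++ [b]
      | none => acc) acc = acc ++ lines.filterMap pvTok := by
  induction lines generalizing acc with
  | nil => simp
  | cons l t ih =>
    simp only [List.foldl_cons, List.filterMap_cons]
    cases pvTok l <;> simp [ih]

-- closed forms over the token list
def pvAdj (toks : List Bool) : Bool := (toks.zip toks.tail).all (fun p => !(p.1 && p.2))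
def pvLast (toks : List Bool) : Bool := (PySem.List.pyGet? toks (-1)).getD false
def pvC2 (toks : List Bool) : Bool := pvAdj toks && !(pvLast toks)

def pvFinA (st : Option (Bool × Bool)) : Bool :=
  match st with
  | none => false
  | some (cur, hasSub) => if cur && !hasSub then false else cur

lemma pvLast_cons_cons (a b : Bool) (t : List Bool) :
    pvLast (a :: b :: t) = pvLast (b :: t) := by
  simp [pvLast, PySem.List.pyGet?_neg_one, List.getLast?_cons_cons]

lemma pvAdj_cons_cons (a b : Bool) (t : List Bool) :
    pvAdj (a :: b :: t) = (!(a && b) && pvAdj (b :: t)) := by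
  simp [pvAdj]

lemma pvC2_false_cons (t : List Bool) : pvC2 (false :: t) = pvC2 t := by
  cases t with
  | nil => decide
  | cons b t' => simp [pvC2, pvAdj_cons_cons, pvLast_cons_cons]

lemma pvC2_true_false (t : List Bool) : pvC2 (true :: false :: t) = pvC2 t := by
  rw [show pvC2 (true :: false :: t) = pvC2 (false :: t) from by
        simp [pvC2, pvAdj_cons_cons, pvLast_cons_cons],
      pvC2_false_cons]

lemma pvC2_true (t : List Bool) : pvC2 (true :: t) =
    (match t with | [] => false | true :: _ => false | false :: t' => pvC2 t') := by
  cases t with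
  | nil => decide
  | cons b t' =>
    cases b with
    | true => simp [pvC2, pvAdj_cons_cons]
    | false => exact pvC2_true_false t'

lemma pvFoldl_none (t : List Bool) : t.foldl pvStepTok none = none := by
  induction t with
  | nil => rfl
  | cons b t ih => simpa [pvStepTok] using ih

-- the three reachable A-states against their closed forms, by one induction
lemma pvMain (toks : List Bool) :
    (pvFinA (toks.foldl pvStepTok (some (false, false))) = (toks.contains true && pvC2 toks)) ∧
    (pvFinA (toks.foldl pvStepTok (some (true, false))) =
      (match toks with | [] => false | true :: _ => false | false :: t => pvC2 t)) ∧
    (pvFinA (toks.foldl pvStepTok (some (true, true))) = pvC2 toks) := by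
  induction toks with
  | nil => decide
  | cons b t ih =>
    obtain ⟨ih0, ih1, ih2⟩ := ih
    refine ⟨?_, ?_, ?_⟩
    · cases b with
      | false =>
        rw [List.foldl_cons, show pvStepTok (some (false, false)) false = some (false, false) from rfl,
            ih0, show (false :: t).contains true = t.contains true by simp, pvC2_false_cons]
      | true =>
        rw [List.foldl_cons, show pvStepTok (some (false, false)) true = some (true, false) from rfl,
            ih1, pvC2_true]
        simp
    · cases b with
      | true =>
        rw [List.foldl_cons, show pvStepTok (some (true, false)) true = none from rfl,
            pvFoldl_none]
        rfl
      | false =>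
        rw [List.foldl_cons, show pvStepTok (some (true, false)) false = some (true, true) from rfl,
            ih2]
    · cases b with
      | false =>
        rw [List.foldl_cons, show pvStepTok (some (true, true)) false = some (true, true) from rfl,
            ih2, pvC2_false_cons]
      | true =>
        rw [List.foldl_cons, show pvStepTok (some (true, true)) true = some (true, false) from rfl,
            ih1, pvC2_true]

-- ===== VERDICT (by name: the statement is the Claim_ definition above) =====
theorem check_sub_bullets_spec : Claim_equal_check_sub_bullets := by
  intro text kwargs _
  unfold Spec_check_sub_bullets check_sub_bullets check_sub_bullets_alt
  rw [toks_eq_filterMap, foldl_filterMap_tok]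
  set toks := ((PySem.Str.split? text "\n").getD []).filterMap pvTok with htoks
  have h := (pvMain toks).1
  simp only [List.nil_append]
  rw [show (match toks.foldl pvStepTok (some (false, false)) with
      | none => false
      | some (cur, hasSub) => if cur && !hasSub then false else cur) =
      pvFinA (toks.foldl pvStepTok (some (false, false))) from rfl, h]
  cases hc : toks.contains true with
  | false => simp [hc]
  | true =>
    simp only [hc, Bool.not_true, Bool.true_and]
    rw [if_neg (by simp)]
    unfold pvC2 pvAdj pvLast
    cases hl : (PySem.List.pyGet? toks (-1)).getD false <;> simp [hl]
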